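-- pv_equiv track=rewrite | github.com/HertegKohar/cp423 | Assignment 1 Question 3/src/webcrawler3.py | optimize_sequence_mapping
-- ===== SOURCE A (Python) =====
-- def optimize_sequence_mapping(sequence_mapping):
--     """
--     Optimizes the sequence mapping to find the optimal content block,
--     the goal is to find the distribution with the most '0's inside and
--     the most '1's inside. Return span uses token positions, not chars.
--     -----
--     Args:
--         sequence_mapping: List of tuples (binary_mapping: int, start: int, end: int) for mapping each token as described
--     Returns:
--         optimal_tokens_span: Tuple (start: int, end: int) for optimal start and end token of the content block
--         function_outputs: 2d array of function outputs for each combination of i and j input values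
--         max_score: Tuple (low: int, high: int) for the lowest and highest score of the optimization function
--     """
--     #
--     # Brute forcing all combinations of i and j is too slow.
--     #
--     # Algorithm works based on the following observation:
--     # each time i == j the score is the sum of the sequence
--     # each time j moves forward a bit, the score is:
--     #   the previous score + 1 if the token is 0, or the previous score -1 if the token is 1
--     # So, we can calculate the score for each i and j combination by iterating through the sequence and
--     # adding or subtracting 1 for each token, and resetting the score each time i moves forward a bit.
--     # We keep track of the max score and optimal span along the way to get the correct answer in the end.
--     #
--     n_tokens = len(sequence_mapping)
--     function_outputs = [[0 for _ in range(n_tokens)] for _ in range(n_tokens)]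
--     score_when_i_equals_j = sum([sequence_mapping[i][0] for i in range(n_tokens)])
--     max_score = score_when_i_equals_j # assume for now
--     optimal_tokens_span = (0,0)
--     for i in range(0, n_tokens):
--         current_score = score_when_i_equals_j
--         for j in range(i+1, n_tokens):
--             # if the 'consumed' bit: is 0 --> score += 1, if 1 --> score -= 1
--             if sequence_mapping[j-1][0] == 0:
--                 current_score += 1
--             else:
--                 current_score -= 1
--             if current_score > max_score:
--                 max_score = current_score
--                 optimal_tokens_span = (i, j)
--             function_outputs[j][i] = current_score
--     return optimal_tokens_span, function_outputs, max_score
-- ===== SOURCE B (Python) =====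
-- def optimize_sequence_mapping(sequence_mapping):
--     # Prefix-sum re-implementation: closed-form cell values from a prefix
--     # array P, suffix maxima of P for the optimal span in O(n) instead of
--     # the incremental O(n^2) accumulator scan.
--     n = len(sequence_mapping)
--     total = 0
--     P = [0]
--     for bit, _start, _end in sequence_mapping:
--         total += bit
--         P.append(P[-1] + (1 if bit == 0 else -1))
--     function_outputs = [[total + P[j] - P[i] if i < j else 0 for i in range(n)]
--                         for j in range(n)]
--     # suffix maxima of P over the reachable j values 1..n-1
--     S = [0] * n  # S[i] = max(P[i+1..n-1]), valid for i <= n-2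
--     m = None
--     for i in range(n - 2, -1, -1):
--         if m is None or P[i + 1] > m:
--             m = P[i + 1]
--         S[i] = m
--     best_gain = 0
--     best_i = 0
--     for i in range(n - 1):
--         gain = S[i] - P[i]
--         if gain > best_gain:
--             best_gain = gain
--             best_i = i
--     if best_gain > 0:
--         target = P[best_i] + best_gain
--         j = best_i + 1
--         while P[j] != target:
--             j += 1
--         optimal_tokens_span = (best_i, j)
--     else:
--         optimal_tokens_span = (0, 0)
--     return optimal_tokens_span, function_outputs, total + best_gain
-- ===== Notes on version B (the rewrite author's own statement) =====
-- stated objective: alternative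
-- what changed: Replaces the per-row incremental accumulator with a prefix-sum array: matrix cells are filled by the closed form total+P[j]-P[i], and the optimal span is found in O(n) from suffix maxima of the prefix array plus a single forward scan (strict-> keeps A's tie-breaking), instead of A's O(n^2) running-score scan with per-cell max updates.
import Mathlib
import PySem

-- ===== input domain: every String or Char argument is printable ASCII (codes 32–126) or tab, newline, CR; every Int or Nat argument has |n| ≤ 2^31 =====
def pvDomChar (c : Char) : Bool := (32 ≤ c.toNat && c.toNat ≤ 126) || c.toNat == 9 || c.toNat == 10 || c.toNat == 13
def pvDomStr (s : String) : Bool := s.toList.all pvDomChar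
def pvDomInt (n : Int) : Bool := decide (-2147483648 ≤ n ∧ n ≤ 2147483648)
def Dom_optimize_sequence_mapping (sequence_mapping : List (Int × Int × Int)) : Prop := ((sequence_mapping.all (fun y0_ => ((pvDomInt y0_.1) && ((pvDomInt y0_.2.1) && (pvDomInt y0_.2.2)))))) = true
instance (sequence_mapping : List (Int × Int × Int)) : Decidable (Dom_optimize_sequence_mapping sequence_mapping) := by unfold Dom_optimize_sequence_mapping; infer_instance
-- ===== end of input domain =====

-- B replaces A's incremental per-cell accumulator by a prefix-sum array (closed-form cell
-- values) and finds the optimal span from suffix maxima of the prefix array in O(n)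
-- instead of the O(n^2) scan; objective: alternative decomposition.

-- ===== PORT A =====
-- list indices (j-1, and the matrix writes) are always nonnegative and in range here,
-- so getD / modify / set are exact ports of Python's indexing.
def optimize_sequence_mapping (sequence_mapping : List (Int × Int × Int)) : (Int × Int) × List (List Int) × Int :=
  let n := sequence_mapping.length
  let fo0 : List (List Int) := (List.range n).map (fun _ => (List.range n).map (fun _ => (0 : Int)))
  let total : Int := ((List.range n).map (fun i => (sequence_mapping.getD i (0, 0, 0)).1)).sum
  let final := (List.range n).foldl
    (fun (st : Int × (Int × Int) × List (List Int)) i =>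
      let inner := (List.range' (i + 1) (n - (i + 1))).foldl
        (fun (s : Int × Int × (Int × Int) × List (List Int)) j =>
          let cs := if (sequence_mapping.getD (j - 1) (0, 0, 0)).1 = 0 then s.1 + 1 else s.1 - 1
          let msSp := if cs > s.2.1 then (cs, ((i : Int), (j : Int))) else (s.2.1, s.2.2.1)
          let fo := s.2.2.2.modify j (fun row => row.set i cs)
          (cs, msSp.1, msSp.2, fo))
        (total, st)
      inner.2)
    (total, ((0 : Int), (0 : Int)), fo0)
  (final.2.1, final.2.2, final.1)

-- ===== PORT B =====
-- faithful port of the while loop 'while P[j] != target: j += 1' (fuel n is never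
-- exhausted: the target value occurs in P within the scanned range).
def pvFindJ (P : List Int) (target : Int) : Nat → Nat → Nat
  | 0, j => j
  | fuel + 1, j => if P.getD j 0 = target then j else pvFindJ P target fuel (j + 1)

-- loop body of the backward suffix-max scan (m is None ↔ first iteration)
def pvSStep (P : List Int) (s : Option Int × List Int) (i : Nat) : Option Int × List Int :=
  let m := match s.1 with
    | none => P.getD (i + 1) 0
    | some m => if P.getD (i + 1) 0 > m then P.getD (i + 1) 0 else m
  (some m, s.2.set i m)

def optimize_sequence_mapping_alt (sequence_mapping : List (Int × Int × Int)) : (Int × Int) × List (List Int) × Int :=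
  let n := sequence_mapping.length
  let tp := sequence_mapping.foldl
    (fun (s : Int × List Int) t =>
      (s.1 + t.1, s.2 ++ [s.2.getLastD 0 + (if t.1 = 0 then 1 else -1)]))
    (0, [0])
  let total := tp.1
  let P := tp.2
  let fo : List (List Int) := (List.range n).map (fun j => (List.range n).map (fun i =>
    if i < j then total + P.getD j 0 - P.getD i 0 else 0))
  let sres := ((List.range (n - 1)).reverse).foldl (pvSStep P) (none, List.replicate n 0)
  let S := sres.2
  let bg := (List.range (n - 1)).foldl
    (fun (b : Int × Nat) i =>
      let gain := S.getD i 0 - P.getD i 0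
      if gain > b.1 then (gain, i) else b)
    (0, 0)
  let span : Int × Int :=
    if bg.1 > 0 then
      ((bg.2 : Int), (pvFindJ P (P.getD bg.2 0 + bg.1) n (bg.2 + 1) : Int))
    else (0, 0)
  (span, fo, total + bg.1)

-- ===== PRECONDITION & SPEC =====
def Spec_optimize_sequence_mapping (sequence_mapping : List (Int × Int × Int)) (out : (Int × Int) × List (List Int) × Int) : Prop := out = optimize_sequence_mapping_alt sequence_mapping
instance (sequence_mapping : List (Int × Int × Int)) (out : (Int × Int) × List (List Int) × Int) : Decidable (Spec_optimize_sequence_mapping sequence_mapping out) := by unfold Spec_optimize_sequence_mapping; infer_instance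

-- ===== CLAIM (what is proved, stated in full; the proofs are below) =====
def Claim_equal_optimize_sequence_mapping : Prop := ∀ (sequence_mapping : List (Int × Int × Int)), Dom_optimize_sequence_mapping sequence_mapping → Spec_optimize_sequence_mapping sequence_mapping (optimize_sequence_mapping sequence_mapping)

-- ===== LEMMAS AND PROOFS =====

-- proof-layer quantities: ±1 contribution of a token, prefix sums, total, row maxima
def pvD (t : Int × Int × Int) : Int := if t.1 = 0 then 1 else -1

def pvPf (sm : List (Int × Int × Int)) (k : Nat) : Int := ((sm.take k).map pvD).sum

def pvTot (sm : List (Int × Int × Int)) : Int := (sm.map (fun t => t.1)).sum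

def pvMaxF (f : Nat → Int) : List Nat → Int
  | [] => 0
  | j :: t => t.foldl (fun m j' => max m (f j')) (f j)

def pvSuf (sm : List (Int × Int × Int)) (i : Nat) : Int :=
  pvMaxF (pvPf sm) (List.range' (i + 1) (sm.length - (i + 1)))

def pvGain (sm : List (Int × Int × Int)) (i : Nat) : Int := pvSuf sm i - pvPf sm i

def pvJf (sm : List (Int × Int × Int)) (i : Nat) : Nat :=
  ((List.range' (i + 1) (sm.length - (i + 1))).find? (fun j => pvPf sm j == pvSuf sm i)).getD 0

def pvRowMsSp (sm : List (Int × Int × Int)) (i : Nat) (x : Int × (Int × Int)) : Int × (Int × Int) :=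
  (List.range' (i + 1) (sm.length - (i + 1))).foldl
    (fun s j => if pvTot sm + pvPf sm j - pvPf sm i > s.1
      then (pvTot sm + pvPf sm j - pvPf sm i, ((i : Int), (j : Int))) else s) x

def pvRowFo (sm : List (Int × Int × Int)) (i : Nat) (fo : List (List Int)) : List (List Int) :=
  (List.range' (i + 1) (sm.length - (i + 1))).foldl
    (fun fo j => fo.modify j (fun row => row.set i (pvTot sm + pvPf sm j - pvPf sm i))) fo

def pvBstep (sm : List (Int × Int × Int)) (b : Int × Nat) (i : Nat) : Int × Nat :=
  if pvGain sm i > b.1 then (pvGain sm i, i) else b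

def pvScan (q : Int) : List Int → List Int
  | [] => []
  | d :: ds => (q + d) :: pvScan (q + d) ds

-- generic max-fold facts
lemma pv_foldl_max_base (f : Nat → Int) :
    ∀ (l : List Nat) (x y : Int),
      l.foldl (fun m j => max m (f j)) (max x y) = max x (l.foldl (fun m j => max m (f j)) y) := by
  intro l
  induction l with
  | nil => intro x y; simp
  | cons j t ih =>
    intro x y
    simp only [List.foldl_cons]
    rw [max_assoc, ih]

lemma pv_le_foldl (f : Nat → Int) :
    ∀ (l : List Nat) (x : Int), x ≤ l.foldl (fun m j => max m (f j)) x := by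
  intro l
  induction l with
  | nil => intro x; simp
  | cons j t ih =>
    intro x
    simp only [List.foldl_cons]
    exact le_trans (le_max_left x (f j)) (ih _)

lemma pv_foldl_maxF (f : Nat → Int) :
    ∀ (l : List Nat), l ≠ [] → ∀ x, l.foldl (fun m j => max m (f j)) x = max x (pvMaxF f l) := by
  intro l
  cases l with
  | nil => intro h; exact absurd rfl h
  | cons j t =>
    intro _ x
    simp only [List.foldl_cons, pvMaxF]
    rw [pv_foldl_max_base]

lemma pv_maxF_cons (f : Nat → Int) (j : Nat) (t : List Nat) (h : t ≠ []) :
    pvMaxF f (j :: t) = max (f j) (pvMaxF f t) := by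
  simp only [pvMaxF]
  exact pv_foldl_maxF f t h (f j)

lemma pv_maxF_attain (f : Nat → Int) :
    ∀ (l : List Nat), l ≠ [] → ∃ j ∈ l, pvMaxF f l = f j := by
  intro l
  induction l with
  | nil => intro h; exact absurd rfl h
  | cons j t ih =>
    intro _
    by_cases ht : t = []
    · subst ht; exact ⟨j, List.mem_cons_self, rfl⟩
    · rw [pv_maxF_cons f j t ht]
      rcases ih ht with ⟨j0, hj0, hval⟩
      rcases le_total (pvMaxF f t) (f j) with hle | hle
      · exact ⟨j, List.mem_cons_self, max_eq_left hle⟩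
      · exact ⟨j0, List.mem_cons_of_mem _ hj0, by rw [max_eq_right hle, hval]⟩

lemma pv_maxF_shift (c : Int) (f : Nat → Int) :
    ∀ (l : List Nat), l ≠ [] → pvMaxF (fun j => c + f j) l = c + pvMaxF f l := by
  intro l
  induction l with
  | nil => intro h; exact absurd rfl h
  | cons j t ih =>
    intro _
    by_cases ht : t = []
    · subst ht; simp [pvMaxF]
    · rw [pv_maxF_cons _ j t ht, pv_maxF_cons f j t ht, ih ht]
      omega

lemma pv_find?_congr {α : Type} (p q : α → Bool) :
    ∀ (l : List α), (∀ a ∈ l, p a = q a) → l.find? p = l.find? q := by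
  intro l
  induction l with
  | nil => intro _; rfl
  | cons a t ih =>
    intro h
    simp only [List.find?_cons, h a List.mem_cons_self]
    cases q a
    · exact ih (fun b hb => h b (List.mem_cons_of_mem _ hb))
    · rfl

-- first-max characterization of the strict-> argmax fold
lemma pvFM {α : Type} (f : Nat → Int) (g : Nat → α) :
    ∀ (l : List Nat) (ms : Int) (sp : α),
      l.foldl (fun s j => if f j > s.1 then (f j, g j) else s) (ms, sp)
      = (l.foldl (fun m j => max m (f j)) ms,
         if ms < l.foldl (fun m j => max m (f j)) ms
         then ((l.find? (fun j => f j == l.foldl (fun m j' => max m (f j')) ms)).map g).getD sp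
         else sp) := by
  intro l
  induction l with
  | nil => intro ms sp; simp
  | cons j t ih =>
    intro ms sp
    simp only [List.foldl_cons]
    by_cases h : f j > ms
    · rw [if_pos h]
      have hbase : max ms (f j) = f j := max_eq_right (le_of_lt h)
      rw [hbase, ih (f j) (g j)]
      have hle : f j ≤ t.foldl (fun m j' => max m (f j')) (f j) := pv_le_foldl f t (f j)
      have hmsM : ms < t.foldl (fun m j' => max m (f j')) (f j) := lt_of_lt_of_le h hle
      rw [if_pos hmsM]
      by_cases hj : f j = t.foldl (fun m j' => max m (f j')) (f j)
      · rw [if_neg (by omega)]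
        rw [List.find?_cons]
        have : (f j == t.foldl (fun m j' => max m (f j')) (f j)) = true := beq_iff_eq.mpr hj
        rw [this]
        simp
      · have hlt : f j < t.foldl (fun m j' => max m (f j')) (f j) := lt_of_le_of_ne hle hj
        rw [if_pos hlt]
        rw [List.find?_cons]
        have hfalse : (f j == t.foldl (fun m j' => max m (f j')) (f j)) = false :=
          beq_eq_false_iff_ne.mpr hj
        rw [hfalse]
        have ht : t ≠ [] := by
          intro he; subst he; simp at hlt
        have hM : t.foldl (fun m j' => max m (f j')) (f j) = max (f j) (pvMaxF f t) :=
          pv_foldl_maxF f t ht (f j)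
        have hMF : t.foldl (fun m j' => max m (f j')) (f j) = pvMaxF f t := by
          rcases le_total (pvMaxF f t) (f j) with hle2 | hle2
          · rw [hM, max_eq_left hle2] at hlt; omega
          · rw [hM, max_eq_right hle2]
        rcases pv_maxF_attain f t ht with ⟨j0, hj0m, hj0⟩
        have hsome : (t.find? (fun j' => f j' == t.foldl (fun m j'' => max m (f j'')) (f j))).isSome := by
          rw [List.find?_isSome]
          exact ⟨j0, hj0m, beq_iff_eq.mpr (by rw [hMF, hj0])⟩
        rcases Option.isSome_iff_exists.mp hsome with ⟨j1, hj1⟩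
        rw [hj1]
        simp
    · rw [if_neg h]
      have hbase : max ms (f j) = ms := max_eq_left (by omega)
      rw [hbase, ih ms sp]
      by_cases hlt : ms < t.foldl (fun m j' => max m (f j')) ms
      · rw [if_pos hlt, if_pos hlt, List.find?_cons]
        have hfalse : (f j == t.foldl (fun m j' => max m (f j')) ms) = false :=
          beq_eq_false_iff_ne.mpr (by omega)
        rw [hfalse]
      · rw [if_neg hlt, if_neg hlt]

-- prefix-sum recurrence
lemma pvPf_succ (sm : List (Int × Int × Int)) (k : Nat) (hk : k < sm.length) :
    pvPf sm (k + 1) = pvPf sm k + pvD (sm.getD k (0, 0, 0)) := by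
  unfold pvPf
  rw [List.map_take, List.take_add_one]
  rw [List.getElem?_map, List.getElem?_eq_getElem hk]
  simp [List.getD, List.getElem?_eq_getElem hk, List.map_take]

lemma pvSuf_rec (sm : List (Int × Int × Int)) (i : Nat) (h : i + 3 ≤ sm.length) :
    pvSuf sm i = max (pvPf sm (i + 1)) (pvSuf sm (i + 1)) := by
  unfold pvSuf
  have h1 : sm.length - (i + 1) = (sm.length - (i + 2)) + 1 := by omega
  rw [h1, List.range'_succ]
  have h2 : i + 1 + 1 = i + 2 := by omega
  rw [h2]
  have hne : List.range' (i + 2) (sm.length - (i + 2)) ≠ [] := by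
    have : sm.length - (i + 2) ≠ 0 := by omega
    simp [List.range'_eq_nil_iff, this]
  exact pv_maxF_cons (pvPf sm) (i + 1) _ hne

lemma pvSuf_last (sm : List (Int × Int × Int)) (i : Nat) (h : i + 2 = sm.length) :
    pvSuf sm i = pvPf sm (i + 1) := by
  unfold pvSuf
  have h1 : sm.length - (i + 1) = 1 := by omega
  rw [h1]
  simp [List.range', pvMaxF]

-- A's total
lemma pvTotA (sm : List (Int × Int × Int)) :
    ((List.range sm.length).map (fun i => (sm.getD i (0, 0, 0)).1)).sum = pvTot sm := by
  unfold pvTot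
  congr 1
  apply List.ext_getElem
  · simp
  · intro k h1 h2
    simp only [List.getElem_map, List.getElem_range]
    have hk : k < sm.length := by simpa using h2
    rw [List.getD_eq_getElem _ _ hk]

-- A's inner loop: closed-form running score, row argmax fold, matrix updates
lemma pvInner (sm : List (Int × Int × Int)) (i : Nat) :
    ∀ (len a : Nat), i + 1 ≤ a → a + len ≤ sm.length + 1 →
    ∀ (cs0 : Int), cs0 = pvTot sm + pvPf sm (a - 1) - pvPf sm i →
    ∀ (ms : Int) (sp : Int × Int) (fo : List (List Int)),
      (List.range' a len).foldl
        (fun (s : Int × Int × (Int × Int) × List (List Int)) j =>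
          let cs := if (sm.getD (j - 1) (0, 0, 0)).1 = 0 then s.1 + 1 else s.1 - 1
          let msSp := if cs > s.2.1 then (cs, ((i : Int), (j : Int))) else (s.2.1, s.2.2.1)
          let fo := s.2.2.2.modify j (fun row => row.set i cs)
          (cs, msSp.1, msSp.2, fo))
        (cs0, ms, sp, fo)
      = (pvTot sm + pvPf sm (a - 1 + len) - pvPf sm i,
         ((List.range' a len).foldl
            (fun s j => if pvTot sm + pvPf sm j - pvPf sm i > s.1
              then (pvTot sm + pvPf sm j - pvPf sm i, ((i : Int), (j : Int))) else s) (ms, sp)).1,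
         ((List.range' a len).foldl
            (fun s j => if pvTot sm + pvPf sm j - pvPf sm i > s.1
              then (pvTot sm + pvPf sm j - pvPf sm i, ((i : Int), (j : Int))) else s) (ms, sp)).2,
         (List.range' a len).foldl
            (fun fo j => fo.modify j (fun row => row.set i (pvTot sm + pvPf sm j - pvPf sm i))) fo) := by
  intro len
  induction len with
  | zero => intro a _ _ cs0 hcs0 ms sp fo; simp [hcs0]
  | succ len ih =>
    intro a ha hlen cs0 hcs0 ms sp fo
    subst hcs0
    rw [List.range'_succ]
    simp only [List.foldl_cons]
    have hk : a - 1 < sm.length := by omega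
    have hcs : (if (sm.getD (a - 1) (0, 0, 0)).1 = 0
        then pvTot sm + pvPf sm (a - 1) - pvPf sm i + 1
        else pvTot sm + pvPf sm (a - 1) - pvPf sm i - 1)
        = pvTot sm + pvPf sm a - pvPf sm i := by
      have ha1 : a - 1 + 1 = a := by omega
      have := pvPf_succ sm (a - 1) hk
      rw [ha1] at this
      unfold pvD at this
      by_cases hb : (sm.getD (a - 1) (0, 0, 0)).1 = 0
      · rw [if_pos hb]; rw [if_pos hb] at this; omega
      · rw [if_neg hb]; rw [if_neg hb] at this; omega
    rw [hcs]
    have hstep := ih (a + 1) (by omega) (by omega)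
      (pvTot sm + pvPf sm a - pvPf sm i) (by simp)
      (if pvTot sm + pvPf sm a - pvPf sm i > ms
        then (pvTot sm + pvPf sm a - pvPf sm i, ((i : Int), (a : Int)))
        else (ms, sp)).1
      (if pvTot sm + pvPf sm a - pvPf sm i > ms
        then (pvTot sm + pvPf sm a - pvPf sm i, ((i : Int), (a : Int)))
        else (ms, sp)).2
      (fo.modify a (fun row => row.set i (pvTot sm + pvPf sm a - pvPf sm i)))
    simp only [Nat.add_sub_cancel] at hstep
    rw [hstep]
    rw [show a - 1 + (len + 1) = a + len from by omega]


-- A's outer loop decomposed into the (ms,span) fold and the matrix fold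
lemma pvOuter (sm : List (Int × Int × Int)) (T : Int) (hT : T = pvTot sm) :
    ∀ (l : List Nat), (∀ i ∈ l, i ≤ sm.length) →
    ∀ (ms : Int) (sp : Int × Int) (fo : List (List Int)),
      l.foldl
        (fun (st : Int × (Int × Int) × List (List Int)) i =>
          let inner := (List.range' (i + 1) (sm.length - (i + 1))).foldl
            (fun (s : Int × Int × (Int × Int) × List (List Int)) j =>
              let cs := if (sm.getD (j - 1) (0, 0, 0)).1 = 0 then s.1 + 1 else s.1 - 1
              let msSp := if cs > s.2.1 then (cs, ((i : Int), (j : Int))) else (s.2.1, s.2.2.1)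
              let fo := s.2.2.2.modify j (fun row => row.set i cs)
              (cs, msSp.1, msSp.2, fo))
            (T, st)
          inner.2)
        (ms, sp, fo)
      = ((l.foldl (fun x i => pvRowMsSp sm i x) (ms, sp)).1,
         (l.foldl (fun x i => pvRowMsSp sm i x) (ms, sp)).2,
         l.foldl (fun fo i => pvRowFo sm i fo) fo) := by
  intro l
  induction l with
  | nil => intro _ ms sp fo; simp
  | cons i t ih =>
    intro hl ms sp fo
    have hi : i ≤ sm.length := hl i List.mem_cons_self
    simp only [List.foldl_cons]
    have hinit : T = pvTot sm + pvPf sm (i + 1 - 1) - pvPf sm i := by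
      rw [hT]; simp
    rw [pvInner sm i (sm.length - (i + 1)) (i + 1) (by omega) (by omega) T hinit ms sp fo]
    rw [ih (fun j hj => hl j (List.mem_cons_of_mem _ hj))]
    rfl

-- one row of A's argmax fold, in closed form
lemma pvRow (sm : List (Int × Int × Int)) (i : Nat) (h2 : i + 2 ≤ sm.length)
    (ms : Int) (sp : Int × Int) :
    pvRowMsSp sm i (ms, sp)
    = if pvTot sm + pvGain sm i > ms
      then (pvTot sm + pvGain sm i, ((i : Int), (pvJf sm i : Int)))
      else (ms, sp) := by
  unfold pvRowMsSp
  rw [pvFM (fun j => pvTot sm + pvPf sm j - pvPf sm i) (fun j => ((i : Int), (j : Int)))]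
  have hne : List.range' (i + 1) (sm.length - (i + 1)) ≠ [] := by
    have : sm.length - (i + 1) ≠ 0 := by omega
    simp [List.range'_eq_nil_iff, this]
  have hshift : pvMaxF (fun j => pvTot sm + pvPf sm j - pvPf sm i)
      (List.range' (i + 1) (sm.length - (i + 1)))
      = (pvTot sm - pvPf sm i) + pvSuf sm i := by
    have h1 : (fun j => pvTot sm + pvPf sm j - pvPf sm i)
        = (fun j => (pvTot sm - pvPf sm i) + pvPf sm j) := by
      funext j; ring
    rw [h1, pv_maxF_shift (pvTot sm - pvPf sm i) (pvPf sm) _ hne]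
    rfl
  rw [pv_foldl_maxF _ _ hne ms, hshift]
  by_cases hc : pvTot sm + pvGain sm i > ms
  · have hmax : max ms ((pvTot sm - pvPf sm i) + pvSuf sm i) = pvTot sm + pvGain sm i := by
      unfold pvGain at hc ⊢; omega
    rw [hmax, if_pos hc, if_pos hc]
    have hpred : ∀ j ∈ List.range' (i + 1) (sm.length - (i + 1)),
        ((fun j => pvTot sm + pvPf sm j - pvPf sm i == pvTot sm + pvGain sm i) j)
        = ((fun j => pvPf sm j == pvSuf sm i) j) := by
      intro j _
      show (pvTot sm + pvPf sm j - pvPf sm i == pvTot sm + pvGain sm i)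
          = (pvPf sm j == pvSuf sm i)
      by_cases he : pvPf sm j = pvSuf sm i
      · have h1 : (pvPf sm j == pvSuf sm i) = true := beq_iff_eq.mpr he
        have h2 : (pvTot sm + pvPf sm j - pvPf sm i == pvTot sm + pvGain sm i) = true :=
          beq_iff_eq.mpr (by unfold pvGain; omega)
        rw [h1, h2]
      · have h1 : (pvPf sm j == pvSuf sm i) = false := beq_eq_false_iff_ne.mpr he
        have h2 : (pvTot sm + pvPf sm j - pvPf sm i == pvTot sm + pvGain sm i) = false := by
          refine beq_eq_false_iff_ne.mpr ?_
          unfold pvGain; omega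
        rw [h1, h2]
    rw [pv_find?_congr _ _ _ hpred]
    rcases pv_maxF_attain (pvPf sm) _ hne with ⟨j0, hj0m, hj0⟩
    have hsome : ((List.range' (i + 1) (sm.length - (i + 1))).find?
        (fun j => pvPf sm j == pvSuf sm i)).isSome := by
      rw [List.find?_isSome]
      exact ⟨j0, hj0m, beq_iff_eq.mpr hj0.symm⟩
    rcases Option.isSome_iff_exists.mp hsome with ⟨j1, hj1⟩
    unfold pvJf
    rw [hj1]
    simp
  · have hmax : max ms ((pvTot sm - pvPf sm i) + pvSuf sm i) = ms := by
      unfold pvGain at hc; omega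
    rw [hmax, if_neg hc]
    simp

-- simulation of A's row-by-row argmax against B's gain scan
lemma pvSim (sm : List (Int × Int × Int)) :
    ∀ (l : List Nat), (∀ i ∈ l, i + 2 ≤ sm.length) →
    ∀ (ms : Int) (sp : Int × Int) (bg : Int) (bi : Nat),
      ms = pvTot sm + bg → 0 ≤ bg →
      sp = (if 0 < bg then ((bi : Int), (pvJf sm bi : Int)) else (0, 0)) →
      (0 < bg → bi + 2 ≤ sm.length ∧ bg = pvGain sm bi) →
      (l.foldl (fun x i => pvRowMsSp sm i x) (ms, sp)).1
          = pvTot sm + (l.foldl (pvBstep sm) (bg, bi)).1 ∧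
      0 ≤ (l.foldl (pvBstep sm) (bg, bi)).1 ∧
      (l.foldl (fun x i => pvRowMsSp sm i x) (ms, sp)).2
          = (if 0 < (l.foldl (pvBstep sm) (bg, bi)).1
             then (((l.foldl (pvBstep sm) (bg, bi)).2 : Int), (pvJf sm (l.foldl (pvBstep sm) (bg, bi)).2 : Int))
             else (0, 0)) ∧
      (0 < (l.foldl (pvBstep sm) (bg, bi)).1 →
        (l.foldl (pvBstep sm) (bg, bi)).2 + 2 ≤ sm.length ∧
        (l.foldl (pvBstep sm) (bg, bi)).1 = pvGain sm (l.foldl (pvBstep sm) (bg, bi)).2) := by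
  intro l
  induction l with
  | nil =>
    intro _ ms sp bg bi h1 h2 h3 h4
    exact ⟨h1, h2, h3, h4⟩
  | cons i t ih =>
    intro hl ms sp bg bi h1 h2 h3 h4
    simp only [List.foldl_cons]
    have hi2 : i + 2 ≤ sm.length := hl i List.mem_cons_self
    have hrow := pvRow sm i hi2 ms sp
    have hcond : (pvTot sm + pvGain sm i > ms) ↔ (pvGain sm i > bg) := by
      rw [h1]; omega
    by_cases hc : pvGain sm i > bg
    · have hc' : pvTot sm + pvGain sm i > ms := hcond.mpr hc
      rw [if_pos hc'] at hrow
      have hstep : pvRowMsSp sm i (ms, sp)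
          = (pvTot sm + pvGain sm i, ((i : Int), (pvJf sm i : Int))) := hrow
      have hbstep : pvBstep sm (bg, bi) i = (pvGain sm i, i) := by
        unfold pvBstep; rw [if_pos hc]
      rw [hstep, hbstep]
      exact ih (fun j hj => hl j (List.mem_cons_of_mem _ hj))
        _ _ _ _ rfl (by omega)
        (by rw [if_pos (by omega : (0:Int) < pvGain sm i)])
        (fun _ => ⟨hi2, rfl⟩)
    · have hc' : ¬ (pvTot sm + pvGain sm i > ms) := fun h => hc (hcond.mp h)
      rw [if_neg hc'] at hrow
      have hbstep : pvBstep sm (bg, bi) i = (bg, bi) := by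
        unfold pvBstep; rw [if_neg hc]
      rw [hrow, hbstep]
      exact ih (fun j hj => hl j (List.mem_cons_of_mem _ hj)) _ _ _ _ h1 h2 h3 h4

-- matrix-side helpers
lemma pv_foldmod_len {α : Type} (v : Nat → α → α) :
    ∀ (js : List Nat) (fo : List α),
      (js.foldl (fun fo j => fo.modify j (v j)) fo).length = fo.length := by
  intro js
  induction js with
  | nil => intro fo; rfl
  | cons j t ih => intro fo; simp only [List.foldl_cons]; rw [ih, List.length_modify]

lemma pv_foldmod_notmem {α : Type} (v : Nat → α → α) :
    ∀ (js : List Nat) (fo : List α) (j' : Nat), j' ∉ js →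
      (js.foldl (fun fo j => fo.modify j (v j)) fo)[j']? = fo[j']? := by
  intro js
  induction js with
  | nil => intro fo j' _; rfl
  | cons j t ih =>
    intro fo j' hmem
    simp only [List.foldl_cons]
    rw [ih _ _ (fun h => hmem (List.mem_cons_of_mem _ h))]
    rw [List.getElem?_modify]
    have hne : j ≠ j' := fun h => hmem (h ▸ List.mem_cons_self)
    cases fo[j']? <;> simp [hne]

lemma pv_foldmod_mem {α : Type} (v : Nat → α → α) :
    ∀ (js : List Nat) (fo : List α) (j' : Nat), js.Nodup → j' ∈ js →
      (js.foldl (fun fo j => fo.modify j (v j)) fo)[j']? = (fo[j']?).map (v j') := by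
  intro js
  induction js with
  | nil => intro fo j' _ h; cases h
  | cons j t ih =>
    intro fo j' hnd hmem
    simp only [List.foldl_cons]
    rcases List.mem_cons.mp hmem with heq | hmem'
    · subst heq
      have hnot : j' ∉ t := (List.nodup_cons.mp hnd).1
      rw [pv_foldmod_notmem v t _ _ hnot, List.getElem?_modify]
      cases fo[j']? <;> simp
    · have hne : j ≠ j' := by
        rintro rfl
        exact (List.nodup_cons.mp hnd).1 hmem'
      rw [ih _ _ (List.nodup_cons.mp hnd).2 hmem', List.getElem?_modify]
      cases fo[j']? <;> simp [hne]

lemma pv_mem_modify {α : Type} (f : α → α) :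
    ∀ (l : List α) (j : Nat) (r : α), r ∈ l.modify j f → r ∈ l ∨ ∃ r' ∈ l, r = f r' := by
  intro l
  induction l with
  | nil => intro j r h; rw [List.modify_nil] at h; exact Or.inl h
  | cons a t ih =>
    intro j r h
    cases j with
    | zero =>
      rw [List.modify_zero_cons] at h
      rcases List.mem_cons.mp h with heq | hmem
      · exact Or.inr ⟨a, List.mem_cons_self, heq⟩
      · exact Or.inl (List.mem_cons_of_mem _ hmem)
    | succ j =>
      rw [List.modify_succ_cons] at h
      rcases List.mem_cons.mp h with heq | hmem
      · exact Or.inl (heq ▸ List.mem_cons_self)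
      · rcases ih j r hmem with hmem' | ⟨r', hr', heq'⟩
        · exact Or.inl (List.mem_cons_of_mem _ hmem')
        · exact Or.inr ⟨r', List.mem_cons_of_mem _ hr', heq'⟩

lemma pvRowFo_len (sm : List (Int × Int × Int)) (i : Nat) (fo : List (List Int)) :
    (pvRowFo sm i fo).length = fo.length := by
  unfold pvRowFo
  exact pv_foldmod_len (fun j row => row.set i (pvTot sm + pvPf sm j - pvPf sm i)) _ fo

lemma pvRowFo_rows (sm : List (Int × Int × Int)) (i : Nat) (fo : List (List Int))
    (h : ∀ r ∈ fo, r.length = sm.length) :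
    ∀ r ∈ pvRowFo sm i fo, r.length = sm.length := by
  unfold pvRowFo
  induction (List.range' (i + 1) (sm.length - (i + 1))) generalizing fo with
  | nil => exact h
  | cons j t ih =>
    simp only [List.foldl_cons]
    refine ih _ ?_
    intro r hr
    rcases pv_mem_modify _ _ _ _ hr with hmem | ⟨r', hr', heq⟩
    · exact h r hmem
    · rw [heq, List.length_set]
      exact h r' hr'

lemma pv_set_getD (row : List Int) (i i' : Nat) (w : Int) (hi : i < row.length) :
    (row.set i w).getD i' 0 = if i' = i then w else row.getD i' 0 := by
  by_cases hlt : i' < row.length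
  · rw [List.getD_eq_getElem _ _ (by rw [List.length_set]; exact hlt),
      List.getElem_set (h := by rw [List.length_set]; exact hlt)]
    by_cases hii : i' = i
    · rw [if_pos (by omega : i = i'), if_pos hii]
    · rw [if_neg (by omega : ¬ i = i'), if_neg hii, List.getD_eq_getElem _ _ hlt]
  · rw [List.getD_eq_default _ _ (by rw [List.length_set]; omega),
      List.getD_eq_default _ _ (by omega), if_neg (by omega : ¬ i' = i)]

lemma pvRowFo_entry (sm : List (Int × Int × Int)) (i : Nat) (fo : List (List Int))
    (hlen : fo.length = sm.length) (hrows : ∀ r ∈ fo, r.length = sm.length)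
    (j' i' : Nat) (hj' : j' < sm.length) (hi' : i' < sm.length) :
    ((pvRowFo sm i fo).getD j' []).getD i' 0
    = if i' = i ∧ i + 1 ≤ j' then pvTot sm + pvPf sm j' - pvPf sm i
      else (fo.getD j' []).getD i' 0 := by
  unfold pvRowFo
  have hj'fo : j' < fo.length := by omega
  have hrow : fo.getD j' [] = fo[j'] := List.getD_eq_getElem _ _ hj'fo
  have hrlen : fo[j'].length = sm.length := hrows _ (List.getElem_mem hj'fo)
  by_cases hmem : j' ∈ List.range' (i + 1) (sm.length - (i + 1))
  · have hij : i + 1 ≤ j' := (List.mem_range'_1.mp hmem).1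
    have hfold := pv_foldmod_mem (fun j row => row.set i (pvTot sm + pvPf sm j - pvPf sm i))
      (List.range' (i + 1) (sm.length - (i + 1))) fo j' (List.nodup_range' ..) hmem
    have hrowval : ((List.range' (i + 1) (sm.length - (i + 1))).foldl
        (fun fo j => fo.modify j (fun row => row.set i (pvTot sm + pvPf sm j - pvPf sm i))) fo).getD j' []
        = fo[j'].set i (pvTot sm + pvPf sm j' - pvPf sm i) := by
      rw [List.getD_eq_getElem?_getD, hfold, List.getElem?_eq_getElem hj'fo]
      rfl
    rw [hrowval, pv_set_getD _ _ _ _ (by omega)]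
    by_cases hii : i' = i
    · rw [if_pos hii, if_pos ⟨hii, hij⟩]
    · rw [if_neg hii, if_neg (fun h => hii h.1), hrow]
  · have hcond : ¬ (i' = i ∧ i + 1 ≤ j') := by
      rintro ⟨rfl, hij⟩
      exact hmem (List.mem_range'_1.mpr ⟨hij, by omega⟩)
    have hfold := pv_foldmod_notmem (fun j row => row.set i (pvTot sm + pvPf sm j - pvPf sm i))
      (List.range' (i + 1) (sm.length - (i + 1))) fo j' hmem
    have hrowval : ((List.range' (i + 1) (sm.length - (i + 1))).foldl
        (fun fo j => fo.modify j (fun row => row.set i (pvTot sm + pvPf sm j - pvPf sm i))) fo).getD j' []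
        = fo.getD j' [] := by
      rw [List.getD_eq_getElem?_getD, hfold, ← List.getD_eq_getElem?_getD]
    rw [hrowval, if_neg hcond]

lemma pvMatFold_len (sm : List (Int × Int × Int)) :
    ∀ (is : List Nat) (fo : List (List Int)),
      (is.foldl (fun fo i => pvRowFo sm i fo) fo).length = fo.length := by
  intro is
  induction is with
  | nil => intro fo; rfl
  | cons i t ih => intro fo; simp only [List.foldl_cons]; rw [ih, pvRowFo_len]

lemma pvMatFold_rows (sm : List (Int × Int × Int)) :
    ∀ (is : List Nat) (fo : List (List Int)), (∀ r ∈ fo, r.length = sm.length) →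
      ∀ r ∈ is.foldl (fun fo i => pvRowFo sm i fo) fo, r.length = sm.length := by
  intro is
  induction is with
  | nil => intro fo h; exact h
  | cons i t ih =>
    intro fo h
    simp only [List.foldl_cons]
    exact ih _ (pvRowFo_rows sm i fo h)

lemma pvMatFold_entry (sm : List (Int × Int × Int)) :
    ∀ (is : List Nat), is.Nodup →
    ∀ (fo : List (List Int)), fo.length = sm.length → (∀ r ∈ fo, r.length = sm.length) →
    ∀ (j' i' : Nat), j' < sm.length → i' < sm.length →
      ((is.foldl (fun fo i => pvRowFo sm i fo) fo).getD j' []).getD i' 0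
      = if i' ∈ is ∧ i' + 1 ≤ j' then pvTot sm + pvPf sm j' - pvPf sm i'
        else (fo.getD j' []).getD i' 0 := by
  intro is
  induction is with
  | nil => intro _ fo _ _ j' i' _ _; simp
  | cons i t ih =>
    intro hnd fo hlen hrows j' i' hj' hi'
    simp only [List.foldl_cons]
    rw [ih (List.nodup_cons.mp hnd).2 _ (by rw [pvRowFo_len]; exact hlen)
      (pvRowFo_rows sm i fo hrows) _ _ hj' hi']
    rw [pvRowFo_entry sm i fo hlen hrows j' i' hj' hi']
    by_cases hmem : i' ∈ t
    · have hne : i' ≠ i := by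
        rintro rfl; exact (List.nodup_cons.mp hnd).1 hmem
      by_cases hij : i' + 1 ≤ j'
      · rw [if_pos ⟨hmem, hij⟩, if_pos ⟨List.mem_cons_of_mem _ hmem, hij⟩]
      · rw [if_neg (fun h : i' ∈ t ∧ i' + 1 ≤ j' => hij h.2),
          if_neg (fun h : i' = i ∧ i + 1 ≤ j' => hne h.1),
          if_neg (fun h : i' ∈ i :: t ∧ i' + 1 ≤ j' => hij h.2)]
    · rw [if_neg (fun h : i' ∈ t ∧ i' + 1 ≤ j' => hmem h.1)]
      by_cases hii : i' = i
      · subst hii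
        by_cases hij : i' + 1 ≤ j'
        · rw [if_pos ⟨rfl, hij⟩, if_pos ⟨List.mem_cons_self, hij⟩]
        · rw [if_neg (fun h => hij h.2), if_neg (fun h => hij h.2)]
      · rw [if_neg (fun h => hii h.1)]
        have : ¬ (i' ∈ i :: t ∧ i' + 1 ≤ j') := by
          rintro ⟨hm, _⟩
          rcases List.mem_cons.mp hm with h | h
          · exact hii h
          · exact hmem h
        rw [if_neg this]

-- B-side: the P/total fold
lemma pvFoldP :
    ∀ (l : List (Int × Int × Int)) (a : Int) (acc : List Int),
      l.foldl (fun (s : Int × List Int) t =>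
          (s.1 + t.1, s.2 ++ [s.2.getLastD 0 + (if t.1 = 0 then 1 else -1)])) (a, acc)
      = (a + (l.map (fun t => t.1)).sum, acc ++ pvScan (acc.getLastD 0) (l.map pvD)) := by
  intro l
  induction l with
  | nil => intro a acc; simp [pvScan]
  | cons t l' ih =>
    intro a acc
    simp only [List.foldl_cons]
    rw [ih]
    have hd : (if t.1 = 0 then (1 : Int) else -1) = pvD t := rfl
    rw [hd, List.getLastD_concat]
    simp only [List.map_cons, List.sum_cons, pvScan]
    rw [List.append_assoc, List.singleton_append, add_assoc]

lemma pvScan_getD : ∀ (ds : List Int) (q : Int) (k : Nat), k < ds.length →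
    (pvScan q ds).getD k 0 = q + (ds.take (k + 1)).sum := by
  intro ds
  induction ds with
  | nil => intro q k h; simp at h
  | cons d t ih =>
    intro q k h
    cases k with
    | zero => simp [pvScan]
    | succ k =>
      simp only [pvScan, List.getD_cons_succ, List.take_succ_cons, List.sum_cons]
      rw [ih _ _ (by simpa using h)]
      ring

lemma pvP_getD (sm : List (Int × Int × Int)) (k : Nat) (hk : k ≤ sm.length) :
    ((0 : Int) :: pvScan 0 (sm.map pvD)).getD k 0 = pvPf sm k := by
  cases k with
  | zero => simp [pvPf]
  | succ k =>
    rw [List.getD_cons_succ, pvScan_getD _ _ _ (by simpa using hk)]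
    unfold pvPf
    rw [List.map_take]
    omega

def pvOptM (sm : List (Int × Int × Int)) (k : Nat) : Option Int :=
  if k + 2 ≤ sm.length then some (pvSuf sm k) else none

-- B-side: the suffix-max array fold
lemma pvSfold (sm : List (Int × Int × Int)) (Q : List Int)
    (hQ : ∀ m, m ≤ sm.length → Q.getD m 0 = pvPf sm m) :
    ∀ (k : Nat), k ≤ sm.length - 1 → ∀ (S : List Int), S.length = sm.length →
      (((List.range k).reverse).foldl (pvSStep Q) (pvOptM sm k, S)).2.length = sm.length ∧
      ∀ i, (((List.range k).reverse).foldl (pvSStep Q) (pvOptM sm k, S)).2.getD i 0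
        = if i < k then pvSuf sm i else S.getD i 0 := by
  intro k
  induction k with
  | zero => intro _ S hS; exact ⟨hS, fun i => by simp⟩
  | succ k ih =>
    intro hk S hS
    have hrev : (List.range (k + 1)).reverse = k :: (List.range k).reverse := by
      rw [List.range_succ, List.reverse_append]
      rfl
    rw [hrev]
    simp only [List.foldl_cons]
    have hm : (match pvOptM sm (k + 1) with
        | none => Q.getD (k + 1) 0
        | some m => if Q.getD (k + 1) 0 > m then Q.getD (k + 1) 0 else m) = pvSuf sm k := by
      unfold pvOptM
      by_cases h3 : k + 3 ≤ sm.length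
      · rw [if_pos (by omega : k + 1 + 2 ≤ sm.length)]
        rw [hQ (k + 1) (by omega)]
        rw [pvSuf_rec sm k h3]
        simp only []
        rcases le_or_gt (pvPf sm (k + 1)) (pvSuf sm (k + 1)) with hle | hgt
        · rw [if_neg (by omega), max_eq_right hle]
        · rw [if_pos (by omega), max_eq_left (by omega)]
      · rw [if_neg (by omega)]
        rw [hQ (k + 1) (by omega)]
        rw [pvSuf_last sm k (by omega)]
    have hstepeq : pvSStep Q (pvOptM sm (k + 1), S) k
        = (some (pvSuf sm k), S.set k (pvSuf sm k)) := by
      unfold pvSStep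
      simp only []
      rw [hm]
    rw [hstepeq]
    have hstep := ih (by omega) (S.set k (pvSuf sm k)) (by rw [List.length_set]; exact hS)
    have hopt : pvOptM sm k = some (pvSuf sm k) := by
      unfold pvOptM; rw [if_pos (by omega)]
    rw [hopt] at hstep
    refine ⟨hstep.1, fun i => ?_⟩
    rw [hstep.2 i]
    by_cases hik : i < k
    · rw [if_pos hik, if_pos (by omega)]
    · rw [if_neg hik]
      rw [pv_set_getD S k i (pvSuf sm k) (by omega)]
      by_cases hieq : i = k
      · rw [if_pos hieq, if_pos (by omega), hieq]
      · rw [if_neg hieq, if_neg (by omega)]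

-- B-side: the forward gain scan equals the abstract pvBstep fold
lemma pvBgfold (sm : List (Int × Int × Int)) (S P : List Int)
    (hS : ∀ i, i < sm.length - 1 → S.getD i 0 = pvSuf sm i)
    (hP : ∀ m, m ≤ sm.length → P.getD m 0 = pvPf sm m) :
    (List.range (sm.length - 1)).foldl
      (fun (b : Int × Nat) i =>
        if S.getD i 0 - P.getD i 0 > b.1 then (S.getD i 0 - P.getD i 0, i) else b) (0, 0)
    = (List.range (sm.length - 1)).foldl (pvBstep sm) (0, 0) := by
  apply PySem.List.foldl_congr_mem
  intro acc i hi
  have hi' := List.mem_range.mp hi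
  rw [hS i hi', hP i (by omega)]
  rfl

-- B-side: the while loop finds the first attaining index
lemma pvFindJ_eq (sm : List (Int × Int × Int)) (Q : List Int)
    (hQ : ∀ m, m ≤ sm.length → Q.getD m 0 = pvPf sm m) (tg : Int) :
    ∀ (len a fuel j' : Nat), len ≤ fuel → a + len ≤ sm.length →
      (List.range' a len).find? (fun j => pvPf sm j == tg) = some j' →
      pvFindJ Q tg fuel a = j' := by
  intro len
  induction len with
  | zero => intro a fuel j' _ _ h; simp at h
  | succ len ih =>
    intro a fuel j' hfuel hlen hfind
    rw [List.range'_succ, List.find?_cons] at hfind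
    obtain ⟨f, rfl⟩ : ∃ f, fuel = f + 1 := ⟨fuel - 1, by omega⟩
    unfold pvFindJ
    rw [hQ a (by omega)]
    by_cases hhit : pvPf sm a = tg
    · rw [if_pos hhit]
      rw [show (pvPf sm a == tg) = true from beq_iff_eq.mpr hhit] at hfind
      simpa using hfind
    · rw [if_neg hhit]
      rw [show (pvPf sm a == tg) = false from beq_eq_false_iff_ne.mpr hhit] at hfind
      exact ih (a + 1) f j' (by omega) (by omega) hfind

-- A's matrix equals B's matrix
lemma pvMat (sm : List (Int × Int × Int)) :
    (List.range sm.length).foldl (fun fo i => pvRowFo sm i fo)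
        ((List.range sm.length).map (fun _ => (List.range sm.length).map (fun _ => (0 : Int))))
    = (List.range sm.length).map (fun j => (List.range sm.length).map (fun i =>
        if i < j then pvTot sm + pvPf sm j - pvPf sm i else 0)) := by
  have hlen0 : ((List.range sm.length).map
      (fun _ => (List.range sm.length).map (fun _ => (0 : Int)))).length = sm.length := by
    simp
  have hrows0 : ∀ r ∈ (List.range sm.length).map
      (fun _ => (List.range sm.length).map (fun _ => (0 : Int))), r.length = sm.length := by
    intro r hr
    rcases List.mem_map.mp hr with ⟨_, _, rfl⟩
    simp
  apply List.ext_getElem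
  · rw [pvMatFold_len, hlen0]; simp
  · intro j' h1 h2
    have hj' : j' < sm.length := by rw [pvMatFold_len, hlen0] at h1; exact h1
    apply List.ext_getElem
    · rw [pvMatFold_rows sm _ _ hrows0 _ (List.getElem_mem h1)]
      simp
    · intro i' h3 h4
      have hi' : i' < sm.length := by
        rw [pvMatFold_rows sm _ _ hrows0 _ (List.getElem_mem h1)] at h3
        exact h3
      have hentry := pvMatFold_entry sm (List.range sm.length) List.nodup_range
        _ hlen0 hrows0 j' i' hj' hi'
      rw [List.getD_eq_getElem _ _ h1, List.getD_eq_getElem _ _ h3] at hentry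
      rw [hentry]
      have hbase : ((((List.range sm.length).map
          (fun _ => (List.range sm.length).map (fun _ => (0 : Int)))).getD j' []).getD i' 0) = 0 := by
        have h5 : j' < ((List.range sm.length).map
            (fun _ => (List.range sm.length).map (fun _ => (0 : Int)))).length := by
          simpa using hj'
        rw [List.getD_eq_getElem _ _ h5]
        simp only [List.getElem_map]
        rw [List.getD_eq_getElem _ _ (by simpa using hi')]
        simp
      simp only [List.getElem_map, List.getElem_range]
      by_cases hij : i' < j'
      · rw [if_pos ⟨List.mem_range.mpr hi', by omega⟩, if_pos hij]
      · rw [if_neg (fun h => hij (by omega)), if_neg hij, hbase]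

-- ===== VERDICT (by name: the statement is the Claim_ definition above) =====
theorem optimize_sequence_mapping_spec : Claim_equal_optimize_sequence_mapping := by
  intro sm _
  unfold Spec_optimize_sequence_mapping
  by_cases hsm : sm = []
  · subst hsm; rfl
  have hn : 0 < sm.length := List.length_pos_iff.mpr hsm
  have hQ : ∀ m, m ≤ sm.length → ((0 : Int) :: pvScan 0 (sm.map pvD)).getD m 0 = pvPf sm m :=
    fun m hm => pvP_getD sm m hm
  obtain ⟨e1, e2, e3, e4⟩ := pvSim sm (List.range (sm.length - 1))
    (fun i hi => by have := List.mem_range.mp hi; omega)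
    (pvTot sm) (0, 0) 0 0 (by ring) le_rfl (by norm_num) (fun h => absurd h (by omega))
  -- A's port in closed form
  have hA : optimize_sequence_mapping sm =
      ((if 0 < ((List.range (sm.length - 1)).foldl (pvBstep sm) (0, 0)).1
        then ((((List.range (sm.length - 1)).foldl (pvBstep sm) (0, 0)).2 : Int),
              (pvJf sm ((List.range (sm.length - 1)).foldl (pvBstep sm) (0, 0)).2 : Int))
        else (0, 0)),
       (List.range sm.length).map (fun j => (List.range sm.length).map (fun i =>
         if i < j then pvTot sm + pvPf sm j - pvPf sm i else 0)),
       pvTot sm + ((List.range (sm.length - 1)).foldl (pvBstep sm) (0, 0)).1) := by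
    simp only [optimize_sequence_mapping]
    rw [pvTotA sm]
    rw [pvOuter sm (pvTot sm) rfl (List.range sm.length)
      (fun i hi => by have := List.mem_range.mp hi; omega)]
    have hsplit : List.range sm.length = List.range (sm.length - 1) ++ [sm.length - 1] := by
      conv_lhs => rw [show sm.length = (sm.length - 1) + 1 from by omega]
      rw [List.range_succ]
    have hlast : ∀ x : Int × (Int × Int), pvRowMsSp sm (sm.length - 1) x = x := by
      intro x
      unfold pvRowMsSp
      rw [show sm.length - (sm.length - 1 + 1) = 0 from by omega]
      rfl
    have hMSfold : (List.range sm.length).foldl (fun x i => pvRowMsSp sm i x)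
        (pvTot sm, ((0 : Int), (0 : Int)))
        = (List.range (sm.length - 1)).foldl (fun x i => pvRowMsSp sm i x)
        (pvTot sm, ((0 : Int), (0 : Int))) := by
      rw [hsplit, List.foldl_append]
      simp only [List.foldl_cons, List.foldl_nil]
      rw [hlast]
    rw [hMSfold, pvMat sm, e1, e3]
  -- B's port in closed form
  have hP : sm.foldl (fun (s : Int × List Int) t =>
      (s.1 + t.1, s.2 ++ [s.2.getLastD 0 + (if t.1 = 0 then 1 else -1)])) (0, [0])
      = (pvTot sm, (0 : Int) :: pvScan 0 (sm.map pvD)) := by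
    rw [pvFoldP]
    exact congrArg₂ Prod.mk (zero_add _) rfl
  have hB : optimize_sequence_mapping_alt sm =
      ((if 0 < ((List.range (sm.length - 1)).foldl (pvBstep sm) (0, 0)).1
        then ((((List.range (sm.length - 1)).foldl (pvBstep sm) (0, 0)).2 : Int),
              (pvJf sm ((List.range (sm.length - 1)).foldl (pvBstep sm) (0, 0)).2 : Int))
        else (0, 0)),
       (List.range sm.length).map (fun j => (List.range sm.length).map (fun i =>
         if i < j then pvTot sm + pvPf sm j - pvPf sm i else 0)),
       pvTot sm + ((List.range (sm.length - 1)).foldl (pvBstep sm) (0, 0)).1) := by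
    simp only [optimize_sequence_mapping_alt]
    rw [hP]
    simp only []
    obtain ⟨hSlen, hSent⟩ := pvSfold sm ((0 : Int) :: pvScan 0 (sm.map pvD)) hQ
      (sm.length - 1) (by omega) (List.replicate sm.length 0) (by simp)
    have hnone : pvOptM sm (sm.length - 1) = none := by
      unfold pvOptM; rw [if_neg (by omega)]
    rw [hnone] at hSent
    have hS' : ∀ i, i < sm.length - 1 →
        (((List.range (sm.length - 1)).reverse).foldl
          (pvSStep ((0 : Int) :: pvScan 0 (sm.map pvD)))
          (none, List.replicate sm.length 0)).2.getD i 0 = pvSuf sm i := by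
      intro i hi
      rw [hSent i, if_pos hi]
    rw [pvBgfold sm _ _ hS' hQ]
    simp only [gt_iff_lt]
    refine congrArg₂ Prod.mk ?_ (congrArg₂ Prod.mk ?_ rfl)
    · by_cases hbg : 0 < ((List.range (sm.length - 1)).foldl (pvBstep sm) (0, 0)).1
      · rw [if_pos hbg, if_pos hbg]
        obtain ⟨hbi2, hbgain⟩ := e4 hbg
        have hT : ((0 : Int) :: pvScan 0 (sm.map pvD)).getD
            ((List.range (sm.length - 1)).foldl (pvBstep sm) (0, 0)).2 0
            + ((List.range (sm.length - 1)).foldl (pvBstep sm) (0, 0)).1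
            = pvSuf sm ((List.range (sm.length - 1)).foldl (pvBstep sm) (0, 0)).2 := by
          rw [hQ _ (by omega), hbgain]
          unfold pvGain
          ring
        rw [hT]
        have hne : List.range' (((List.range (sm.length - 1)).foldl (pvBstep sm) (0, 0)).2 + 1)
            (sm.length - (((List.range (sm.length - 1)).foldl (pvBstep sm) (0, 0)).2 + 1)) ≠ [] := by
          have : sm.length - (((List.range (sm.length - 1)).foldl (pvBstep sm) (0, 0)).2 + 1) ≠ 0 := by
            omega
          simp [List.range'_eq_nil_iff, this]
        obtain ⟨j0, hj0m, hj0⟩ := pv_maxF_attain (pvPf sm) _ hne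
        have hsome : ((List.range' (((List.range (sm.length - 1)).foldl (pvBstep sm) (0, 0)).2 + 1)
            (sm.length - (((List.range (sm.length - 1)).foldl (pvBstep sm) (0, 0)).2 + 1))).find?
            (fun j => pvPf sm j ==
              pvSuf sm ((List.range (sm.length - 1)).foldl (pvBstep sm) (0, 0)).2)).isSome := by
          rw [List.find?_isSome]
          exact ⟨j0, hj0m, beq_iff_eq.mpr hj0.symm⟩
        obtain ⟨j1, hj1⟩ := Option.isSome_iff_exists.mp hsome
        have hjf : pvJf sm ((List.range (sm.length - 1)).foldl (pvBstep sm) (0, 0)).2 = j1 := by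
          unfold pvJf
          rw [hj1]
          rfl
        have hfind := pvFindJ_eq sm ((0 : Int) :: pvScan 0 (sm.map pvD)) hQ
          (pvSuf sm ((List.range (sm.length - 1)).foldl (pvBstep sm) (0, 0)).2)
          (sm.length - (((List.range (sm.length - 1)).foldl (pvBstep sm) (0, 0)).2 + 1))
          (((List.range (sm.length - 1)).foldl (pvBstep sm) (0, 0)).2 + 1)
          sm.length j1 (by omega) (by omega) hj1
        rw [hfind, hjf]
      · rw [if_neg hbg, if_neg hbg]
    · refine List.map_eq_map_iff.mpr ?_
      intro j hj
      refine List.map_eq_map_iff.mpr ?_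
      intro i hi
      have hj' := List.mem_range.mp hj
      have hi' := List.mem_range.mp hi
      by_cases hij : i < j
      · rw [if_pos hij, if_pos hij, hQ j (by omega), hQ i (by omega)]
      · rw [if_neg hij, if_neg hij]
  rw [hA, hB]
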